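-- pv_equiv track=rewrite | github.com/LindseyBohr/pirateCoreGenome | construct_new_core_genome.py | make_protein_fancy
-- ===== SOURCE A (Python) =====
-- def make_protein_fancy(protein,length):
--     """Deals with fission, duplicates, etc in gene family index"""
--     if not protein:
--         return "none_"+length
--     elif ":" and ";" in protein: ### this and the other colon one are fusions and don't actually get used with the above num_fission_loci if statement
--         return make_protein_fancy(protein.split(";")[1],length)
--     elif ";" in protein:
--         return protein.split(";")[0]
--     elif ":" in protein:
--         protein=protein[1:]
--         return protein.split(":")[0]
--     return protein
-- ===== SOURCE B (Python) =====
-- def make_protein_fancy(protein, length):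
--     """Deals with fission, duplicates, etc in gene family index.
--
--     Straight-line re-implementation: A's recursion re-enters itself on
--     protein.split(";")[1], which can never contain ';' (split removes them
--     all), so the recursive call always lands in a base case.  We therefore
--     normalise once and fall through a flat branch chain.
--     """
--     if protein and ";" in protein:
--         protein = protein.split(";")[1]
--     if not protein:
--         return "none_" + length
--     if ":" in protein:
--         return protein[1:].split(":")[0]
--     return protein
-- ===== Notes on version B (the rewrite author's own statement) =====
-- stated objective: simpler
-- what changed: Replaced A's self-recursion (re-entry on protein.split(';')[1], which can never contain ';') by a single straight-line normalisation step followed by a flat branch chain, dropping the unreachable "';' in protein" branch.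
import Mathlib
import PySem

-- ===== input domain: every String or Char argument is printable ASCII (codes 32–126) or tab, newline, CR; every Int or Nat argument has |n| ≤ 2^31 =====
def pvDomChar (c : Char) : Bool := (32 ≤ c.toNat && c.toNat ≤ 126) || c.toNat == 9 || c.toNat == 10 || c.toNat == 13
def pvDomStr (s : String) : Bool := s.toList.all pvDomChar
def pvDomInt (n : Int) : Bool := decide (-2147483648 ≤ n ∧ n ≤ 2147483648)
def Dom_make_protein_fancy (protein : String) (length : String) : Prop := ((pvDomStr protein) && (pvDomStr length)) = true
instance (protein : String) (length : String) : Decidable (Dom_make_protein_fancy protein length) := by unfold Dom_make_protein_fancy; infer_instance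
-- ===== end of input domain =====

-- B replaces A's self-recursion by one straight-line normalisation step; objective: simpler.

-- ===== PORT A =====
-- A-side helpers: a specification of Python's split on a one-character separator,
-- used only to prove A's recursion terminates (the recursive call strictly shrinks).
def pvSc (c : Char) : List Char → List Char × List (List Char)
  | [] => ([], [])
  | x :: xs =>
      let p := pvSc c xs
      if x = c then ([], p.1 :: p.2) else (x :: p.1, p.2)

theorem pvGo_eq (c : Char) : ∀ (fuel : Nat) (l cur : List Char) (acc : List (List Char)),
    l.length < fuel →
    PySem.Chars.splitOn.go [c] fuel l cur acc
      = acc.reverse ++ (cur.reverse ++ (pvSc c l).1) :: (pvSc c l).2 := by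
  intro fuel
  induction fuel with
  | zero => intro l cur acc h; omega
  | succ f ih =>
    intro l cur acc h
    cases l with
    | nil =>
      rw [PySem.Chars.splitOn.go]
      · simp [pvSc]
      · omega
    | cons x rest =>
      rw [PySem.Chars.splitOn.go]
      by_cases hx : x = c
      · subst hx
        have hp : [x].isPrefixOf (x :: rest) = true := by simp [List.isPrefixOf]
        rw [if_pos hp]
        rw [show List.drop [x].length (x :: rest) = rest from rfl]
        rw [ih rest [] (cur.reverse :: acc) (by simpa using Nat.lt_of_succ_lt_succ h)]
        simp [pvSc]
      · have hp : [c].isPrefixOf (x :: rest) = false := by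
          simp [List.isPrefixOf]
          intro hc; exact absurd hc.symm hx
        rw [if_neg (by simp [hp])]
        rw [ih rest (x :: cur) acc (by simpa using Nat.lt_of_succ_lt_succ h)]
        simp [pvSc, hx]

theorem pvSplitOn_singleton (c : Char) (l : List Char) :
    PySem.Chars.splitOn l [c] = (pvSc c l).1 :: (pvSc c l).2 := by
  unfold PySem.Chars.splitOn
  rw [pvGo_eq c (l.length + 1) l [] [] (Nat.lt_succ_self _)]
  simp

theorem pvSc_fst_le (c : Char) (l : List Char) : (pvSc c l).1.length ≤ l.length := by
  induction l with
  | nil => simp [pvSc]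
  | cons x xs ih =>
    by_cases hx : x = c <;> simp [pvSc, hx] <;> try omega

theorem pvSc_snd (c : Char) (l : List Char) (h : c ∈ l) :
    ∃ h' t, (pvSc c l).2 = h' :: t ∧ h'.length < l.length := by
  induction l with
  | nil => cases h
  | cons x xs ih =>
    by_cases hx : x = c
    · refine ⟨(pvSc c xs).1, (pvSc c xs).2, by simp [pvSc, hx], ?_⟩
      have := pvSc_fst_le c xs; simp; omega
    · have hmem : c ∈ xs := by
        rcases List.mem_cons.mp h with h1 | h1
        · exact absurd h1.symm hx
        · exact h1
      obtain ⟨h', t, heq, hlt⟩ := ih hmem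
      exact ⟨h', t, by simp [pvSc, hx, heq], by simp; omega⟩

theorem pvGetD_one {a b : String} {t : List String} :
    PySem.List.pyGetD (a :: b :: t) 1 "" = b := by
  simp [PySem.List.pyGetD, PySem.List.pyGet?, PySem.List.pyIdx?]

-- the Python list protein.split(";")
def pvParts (s : String) : List String :=
  (PySem.Str.split? s ";").getD []

theorem pvParts_eq (s : String) :
    pvParts s = ((pvSc ';' s.toList).1 :: (pvSc ';' s.toList).2).map String.ofList := by
  unfold pvParts
  simp [PySem.Str.split?, PySem.Chars.split?, show (";".toList) = [';'] from rfl,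
    pvSplitOn_singleton]

theorem pvIsIn_semi (s : String) : PySem.Str.isIn ";" s = true ↔ ';' ∈ s.toList := by
  rw [PySem.Str.isIn_iff_infix]
  rw [show (";".toList) = [';'] from rfl]
  exact List.singleton_infix_iff ';' s.toList

-- the recursive call strictly shrinks (cited by A's decreasing_by)
theorem pvSeg_lt (s : String) (h : PySem.Str.isIn ";" s = true) :
    (PySem.List.pyGetD (pvParts s) 1 "").toList.length < s.toList.length := by
  obtain ⟨h', t, heq, hlt⟩ := pvSc_snd ';' s.toList ((pvIsIn_semi s).mp h)
  rw [pvParts_eq, heq]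
  simp only [List.map_cons]
  rw [pvGetD_one]
  simpa using hlt

def make_protein_fancy (protein : String) (length : String) : String :=
  if protein = "" then "none_" ++ length
  -- Python's `":" and ";" in protein` evaluates to `";" in protein` (":" is truthy)
  else if h : PySem.Str.isIn ";" protein = true then
    make_protein_fancy (PySem.List.pyGetD (pvParts protein) 1 "") length
  else if PySem.Str.isIn ";" protein = true then  -- dead branch, kept from A
    PySem.List.pyGetD (pvParts protein) 0 ""
  else if PySem.Str.isIn ":" protein = true then
    PySem.List.pyGetD ((PySem.Str.split? (PySem.Str.slice protein (some 1) none) ":").getD []) 0 ""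
  else protein
termination_by protein.toList.length
decreasing_by exact pvSeg_lt protein h

-- ===== PORT B =====
def make_protein_fancy_alt (protein : String) (length : String) : String :=
  let protein := if protein ≠ "" ∧ PySem.Str.isIn ";" protein = true
    then PySem.List.pyGetD ((PySem.Str.split? protein ";").getD []) 1 ""
    else protein
  if protein = "" then "none_" ++ length
  else if PySem.Str.isIn ":" protein = true then
    PySem.List.pyGetD ((PySem.Str.split? (PySem.Str.slice protein (some 1) none) ":").getD []) 0 ""
  else protein

-- ===== PRECONDITION & SPEC =====
def Spec_make_protein_fancy (protein : String) (length : String) (out : String) : Prop := out = make_protein_fancy_alt protein length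
instance (protein : String) (length : String) (out : String) : Decidable (Spec_make_protein_fancy protein length out) := by unfold Spec_make_protein_fancy; infer_instance

-- ===== CLAIM (what is proved, stated in full; the proofs are below) =====
def Claim_equal_make_protein_fancy : Prop := ∀ (protein : String) (length : String), Dom_make_protein_fancy protein length → Spec_make_protein_fancy protein length (make_protein_fancy protein length)

-- ===== LEMMAS AND PROOFS =====
theorem pvSc_no_c (c : Char) (l : List Char) :
    c ∉ (pvSc c l).1 ∧ ∀ p ∈ (pvSc c l).2, c ∉ p := by
  induction l with
  | nil => simp [pvSc]
  | cons x xs ih =>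
    by_cases hx : x = c
    · simp only [pvSc, hx, if_pos]
      exact ⟨by simp, by
        intro p hp
        rcases List.mem_cons.mp hp with h1 | h1
        · exact h1 ▸ ih.1
        · exact ih.2 p h1⟩
    · simp only [pvSc, if_neg hx]
      refine ⟨?_, ih.2⟩
      intro hmem
      rcases List.mem_cons.mp hmem with h1 | h1
      · exact hx h1.symm
      · exact ih.1 h1

theorem pvSeg_no_semi (s : String) (h : PySem.Str.isIn ";" s = true) :
    PySem.Str.isIn ";" (PySem.List.pyGetD (pvParts s) 1 "") = false := by
  obtain ⟨h', t, heq, _⟩ := pvSc_snd ';' s.toList ((pvIsIn_semi s).mp h)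
  have hno : ';' ∉ h' := (pvSc_no_c ';' s.toList).2 h' (heq ▸ List.mem_cons_self ..)
  rw [pvParts_eq, heq]
  simp only [List.map_cons]
  rw [pvGetD_one]
  rw [PySem.Str.isIn, PySem.Chars.isIn]
  simp [PySem.Chars.find_eq_neg_one_iff]
  intro hc
  exact hno ((List.singleton_infix_iff ';' _).mp (by simpa using hc))

theorem pvTail_eq (s length : String) (hs : PySem.Str.isIn ";" s = false) :
    make_protein_fancy s length =
      (if s = "" then "none_" ++ length
       else if PySem.Str.isIn ":" s = true then
         PySem.List.pyGetD ((PySem.Str.split? (PySem.Str.slice s (some 1) none) ":").getD []) 0 ""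
       else s) := by
  have hs' : PySem.Chars.isIn [';'] s.toList = false := by
    simpa [PySem.Str.isIn, show (";".toList) = [';'] from rfl] using hs
  rw [make_protein_fancy]
  by_cases h0 : s = ""
  · simp [h0]
  · simp [h0, hs']

-- ===== VERDICT (by name: the statement is the Claim_ definition above) =====
theorem make_protein_fancy_spec : Claim_equal_make_protein_fancy := by
  intro protein length _
  unfold Spec_make_protein_fancy make_protein_fancy_alt
  by_cases h0 : protein = ""
  · rw [make_protein_fancy]
    simp [h0]
  by_cases hs : PySem.Str.isIn ";" protein = true
  · rw [make_protein_fancy]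
    rw [if_neg h0, dif_pos hs]
    rw [pvTail_eq _ length (pvSeg_no_semi protein hs)]
    have hcond : protein ≠ "" ∧ PySem.Str.isIn ";" protein = true := ⟨h0, hs⟩
    simp only [if_pos hcond, pvParts]
  · have hsf : PySem.Str.isIn ";" protein = false := eq_false_of_ne_true hs
    rw [pvTail_eq _ length hsf]
    have hc : ¬ (protein ≠ "" ∧ PySem.Str.isIn ";" protein = true) := by
      rintro ⟨-, h2⟩
      rw [hsf] at h2
      cases h2
    rw [if_neg hc]
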